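-- pv_equiv track=rewrite | github.com/xopatil/fake_news_detector | 3.py | check_clickbait
-- ===== SOURCE A (Python) =====
-- def check_clickbait(title):
--     # Common clickbait patterns
--     clickbait_patterns = [
--         "you won't believe", "shocking", "mind blowing", "jaw dropping",
--         "this will make you", "top", "best", "worst", "!!", "???",
--         "secret", "trick", "simple trick", "what happens next", "number",
--         "revealed", "that will", "make you", "before you die"
--     ]
--
--     # Calculate a clickbait score based on pattern matches
--     title_lower = title.lower()
--     matches = sum(1 for pattern in clickbait_patterns if pattern in title_lower)
--
--     # Return 1 if there's likely clickbait, 0 otherwise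
--     return 1 if matches >= 1 else 0
-- ===== SOURCE B (Python) =====
-- def check_clickbait(title):
--     clickbait_patterns = [
--         "you won't believe", "shocking", "mind blowing", "jaw dropping",
--         "this will make you", "top", "best", "worst", "!!", "???",
--         "secret", "trick", "simple trick", "what happens next", "number",
--         "revealed", "that will", "make you", "before you die"
--     ]
--     t = title.lower()
--     # single left-to-right scan: at each position, does some pattern start here?
--     for i in range(len(t) + 1):
--         for p in clickbait_patterns:
--             if t.startswith(p, i):
--                 return 1
--     return 0
-- ===== Notes on version B (the rewrite author's own statement) =====
-- stated objective: alternative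
-- what changed: Replaces the pattern-major count (summing, over the 19 phrases, whether each is contained in the lowered title) by a single position-major left-to-right scan of the title that at each position checks whether some phrase starts there and returns 1 on the first hit.
import Mathlib
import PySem

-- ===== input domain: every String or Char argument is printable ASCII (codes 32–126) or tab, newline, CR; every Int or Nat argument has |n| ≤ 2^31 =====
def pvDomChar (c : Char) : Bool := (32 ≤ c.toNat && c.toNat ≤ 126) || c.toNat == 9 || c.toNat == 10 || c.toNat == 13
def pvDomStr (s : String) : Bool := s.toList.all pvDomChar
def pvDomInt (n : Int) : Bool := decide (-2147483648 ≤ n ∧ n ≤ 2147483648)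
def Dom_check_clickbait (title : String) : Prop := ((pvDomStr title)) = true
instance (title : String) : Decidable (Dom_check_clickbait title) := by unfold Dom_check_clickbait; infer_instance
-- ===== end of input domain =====

-- B replaces the per-pattern `in` count by one left-to-right scan of the title checking at each
-- position whether some pattern starts there (alternative decomposition, same cost class).


-- the fixed clickbait phrase list (shared literal data of both programs)
def pvPatterns : List String :=
  ["you won't believe", "shocking", "mind blowing", "jaw dropping",
   "this will make you", "top", "best", "worst", "!!", "???",
   "secret", "trick", "simple trick", "what happens next", "number",
   "revealed", "that will", "make you", "before you die"]

-- ===== PORT A =====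
def check_clickbait (title : String) : Int :=
  let title_lower := PySem.Str.lower title
  let matchCount : Int :=   -- `matches` is a Lean keyword
    (pvPatterns.map (fun pattern => if PySem.Str.isIn pattern title_lower then (1 : Int) else 0)).sum
  if matchCount ≥ 1 then 1 else 0

-- ===== PORT B =====
-- `t.startswith(p, i)` at position i is `p.isPrefixOf` the i-th suffix; the `for i in range(len(t)+1)`
-- loop with early `return 1` is the structural recursion over the suffixes (exact hand-port).
def pvScan (pats : List (List Char)) : List Char → Int
  | [] => if pats.any (fun p => p.isPrefixOf ([] : List Char)) then 1 else 0
  | c :: rest => if pats.any (fun p => p.isPrefixOf (c :: rest)) then 1 else pvScan pats rest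

def check_clickbait_alt (title : String) : Int :=
  pvScan (pvPatterns.map String.toList) (PySem.Str.lower title).toList

-- ===== PRECONDITION & SPEC =====
def Spec_check_clickbait (title : String) (out : Int) : Prop := out = check_clickbait_alt title
instance (title : String) (out : Int) : Decidable (Spec_check_clickbait title out) := by unfold Spec_check_clickbait; infer_instance

-- ===== CLAIM (what is proved, stated in full; the proofs are below) =====
def Claim_equal_check_clickbait : Prop := ∀ (title : String), Dom_check_clickbait title → Spec_check_clickbait title (check_clickbait title)

-- ===== LEMMAS AND PROOFS =====

-- the scan finds 1 exactly when some pattern is an infix of the text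
lemma pvScan_eq (pats : List (List Char)) (t : List Char) :
    pvScan pats t = if (∃ p ∈ pats, p <:+: t) then 1 else 0 := by
  induction t with
  | nil =>
      simp only [pvScan, List.any_eq_true, List.isPrefixOf_iff_prefix]
      congr 1
      simp [List.infix_iff_prefix_suffix, List.suffix_nil]
  | cons c rest ih =>
      rw [pvScan, ih]
      simp only [List.any_eq_true, List.isPrefixOf_iff_prefix]
      by_cases h : ∃ p ∈ pats, p <+: c :: rest
      · simp only [h, if_pos]
        have : ∃ p ∈ pats, p <:+: c :: rest := by
          obtain ⟨p, hp, hpre⟩ := h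
          exact ⟨p, hp, hpre.isInfix⟩
        simp [this]
      · simp only [h, if_false]
        have hiff : (∃ p ∈ pats, p <:+: rest) ↔ ∃ p ∈ pats, p <:+: c :: rest := by
          constructor
          · rintro ⟨p, hp, hi⟩
            exact ⟨p, hp, hi.trans (List.suffix_cons c rest).isInfix⟩
          · rintro ⟨p, hp, hi⟩
            rcases List.infix_cons_iff.mp hi with hpre | hi'
            · exact absurd ⟨p, hp, hpre⟩ h
            · exact ⟨p, hp, hi'⟩
        simp only [hiff]

-- ===== VERDICT (by name: the statement is the Claim_ definition above) =====
theorem check_clickbait_spec : Claim_equal_check_clickbait := by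
  intro title _
  show check_clickbait title = check_clickbait_alt title
  unfold check_clickbait check_clickbait_alt
  rw [pvScan_eq]
  have key : (∃ p ∈ pvPatterns.map String.toList, p <:+: (PySem.Str.lower title).toList) ↔
      ∃ p ∈ pvPatterns, PySem.Str.isIn p (PySem.Str.lower title) = true := by
    simp only [List.mem_map]
    constructor
    · rintro ⟨q, ⟨p, hp, rfl⟩, hinf⟩
      exact ⟨p, hp, (PySem.Str.isIn_iff_infix p (PySem.Str.lower title)).mpr hinf⟩
    · rintro ⟨p, hp, hin⟩
      exact ⟨p.toList, ⟨p, hp, rfl⟩, (PySem.Str.isIn_iff_infix p (PySem.Str.lower title)).mp hin⟩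
  simp only [PySem.List.sum_map_ite_one_zero, key]
  by_cases h : ∃ p ∈ pvPatterns, PySem.Str.isIn p (PySem.Str.lower title) = true
  · have hc : 0 < pvPatterns.countP fun p => PySem.Str.isIn p (PySem.Str.lower title) :=
      List.countP_pos_iff.mpr h
    have h1 : (1 : Int) ≤ (pvPatterns.countP fun p => PySem.Str.isIn p (PySem.Str.lower title) : Int) := by
      exact_mod_cast hc
    simp
  · have hc : pvPatterns.countP (fun p => PySem.Str.isIn p (PySem.Str.lower title)) = 0 := by
      rw [List.countP_eq_zero]
      intro p hp hin
      exact h ⟨p, hp, hin⟩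
    simp
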